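-- pv_equiv track=rewrite | github.com/DrSamoshin/fairy_tales_backend | app/services/apple_verification.py | _validate_token_structure
-- ===== SOURCE A (Python) =====
-- def _validate_token_structure(token: str) -> bool:
--     """
--     Validate basic JWT token structure.
--
--     Args:
--         token: JWT token string
--
--     Returns:
--         bool: True if token has valid JWT structure
--     """
--     if not token or not isinstance(token, str):
--         return False
--
--     # JWT should have 3 parts separated by dots
--     parts = token.split('.')
--     if len(parts) != 3:
--         return False
--
--     # Each part should be non-empty
--     for part in parts:
--         if not part:
--             return False
--
--     return True
-- ===== SOURCE B (Python) =====
-- def _validate_token_structure(token: str) -> bool: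
--     """Validate basic JWT token structure without splitting into a list."""
--     if not token or not isinstance(token, str):
--         return False
--     # exactly three non-empty dot-free segments <=> exactly two dots,
--     # no adjacent dots, and no dot at either end
--     return (token.count('.') == 2 and '..' not in token
--             and not token.startswith('.') and not token.endswith('.'))
-- ===== Notes on version B (the rewrite author's own statement) =====
-- stated objective: alternative
-- what changed: B never splits the token into a list of parts: it checks the same property directly with string predicates (exactly two dots, no '..' substring, no leading/trailing dot) instead of split-then-count-then-loop.
import Mathlib
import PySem

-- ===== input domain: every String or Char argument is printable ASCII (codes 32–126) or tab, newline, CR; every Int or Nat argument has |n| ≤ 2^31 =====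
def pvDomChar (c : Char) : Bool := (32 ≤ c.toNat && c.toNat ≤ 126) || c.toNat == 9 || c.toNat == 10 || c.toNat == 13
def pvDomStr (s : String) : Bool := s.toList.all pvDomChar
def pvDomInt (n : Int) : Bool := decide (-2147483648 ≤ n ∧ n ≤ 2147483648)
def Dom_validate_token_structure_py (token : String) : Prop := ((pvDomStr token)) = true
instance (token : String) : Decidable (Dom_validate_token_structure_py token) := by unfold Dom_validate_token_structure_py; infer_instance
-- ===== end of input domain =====

-- B checks the JWT shape with direct string predicates (two dots, no "..", no dot at either end)
-- instead of splitting into a list and looping over the parts; same return value, similar cost.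


-- ===== PORT A =====
-- literal port of A: empty-string guard, split on '.', length check, loop (as `all`) over the parts
def validate_token_structure_py (token : String) : Bool :=
  if token.toList = [] then false
  else
    let parts := PySem.Chars.splitOn token.toList ['.']
    if parts.length ≠ 3 then false
    else parts.all (fun p => !p.isEmpty)

-- ===== PORT B =====
def validate_token_structure_py_alt (token : String) : Bool :=
  if token.toList = [] then false
  else
    (PySem.Str.count token "." == 2) && !(PySem.Str.isIn ".." token)
      && !(PySem.Str.startswith token ".") && !(PySem.Str.endswith token ".")

-- ===== PRECONDITION & SPEC =====
def Spec_validate_token_structure_py (token : String) (out : Bool) : Prop := out = validate_token_structure_py_alt token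
instance (token : String) (out : Bool) : Decidable (Spec_validate_token_structure_py token out) := by unfold Spec_validate_token_structure_py; infer_instance

-- ===== CLAIM (what is proved, stated in full; the proofs are below) =====
def Claim_equal_validate_token_structure_py : Prop := ∀ (token : String), Dom_validate_token_structure_py token → Spec_validate_token_structure_py token (validate_token_structure_py token)

-- ===== LEMMAS AND PROOFS =====

-- proof-side structural model of str.split('.') on code points
def sd : List Char → List (List Char)
  | [] => [[]]
  | c :: cs => if c = '.' then [] :: sd cs else (sd cs).modifyHead (fun p => c :: p)

theorem sd_ne_nil (cs : List Char) : sd cs ≠ [] := by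
  induction cs with
  | nil => simp [sd]
  | cons c cs ih =>
    simp only [sd]
    split
    · simp
    · cases hsd : sd cs with
      | nil => exact absurd hsd ih
      | cons a t => simp

theorem sd_cons_exists (cs : List Char) : ∃ a t, sd cs = a :: t := by
  cases hsd : sd cs with
  | nil => exact absurd hsd (sd_ne_nil cs)
  | cons a t => exact ⟨a, t, rfl⟩

theorem splitOn_go_eq (fuel : Nat) : ∀ (l cur : List Char) (acc : List (List Char)),
    l.length ≤ fuel →
    PySem.Chars.splitOn.go ['.'] fuel l cur acc
      = acc.reverse ++ (sd l).modifyHead (fun p => cur.reverse ++ p) := by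
  induction fuel with
  | zero =>
    intro l cur acc h
    have hl : l = [] := by cases l <;> simp_all
    subst hl
    simp [PySem.Chars.splitOn.go, sd]
  | succ n ih =>
    intro l cur acc h
    cases l with
    | nil => simp [PySem.Chars.splitOn.go, sd]
    | cons c rest =>
      rw [PySem.Chars.splitOn.go.eq_def]
      by_cases hc : c = '.'
      · subst hc
        have hpre : List.isPrefixOf ['.'] ('.' :: rest) = true := by
          simp [List.isPrefixOf]
        simp only [hpre, if_pos]
        rw [show List.drop (['.'] : List Char).length ('.' :: rest) = rest from rfl]
        rw [ih rest [] (cur.reverse :: acc) (by simpa using Nat.le_of_succ_le_succ h)]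
        obtain ⟨a, t, hsd⟩ := sd_cons_exists rest
        simp [sd, hsd]
      · have hpre : List.isPrefixOf ['.'] (c :: rest) = false := by
          simp [List.isPrefixOf, Ne.symm hc]
        simp only [hpre]
        rw [ih rest (c :: cur) acc (by simpa using Nat.le_of_succ_le_succ h)]
        obtain ⟨a, t, hsd⟩ := sd_cons_exists rest
        simp [sd, hc, hsd]

theorem splitOn_eq (cs : List Char) : PySem.Chars.splitOn cs ['.'] = sd cs := by
  rw [PySem.Chars.splitOn]
  rw [splitOn_go_eq (cs.length + 1) cs [] [] (by omega)]
  obtain ⟨a, t, hsd⟩ := sd_cons_exists cs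
  simp [hsd]

theorem count_go_eq (fuel : Nat) : ∀ (l : List Char) (acc : Nat),
    l.length ≤ fuel →
    PySem.Chars.count.go ['.'] fuel l acc = acc + l.count '.' := by
  induction fuel with
  | zero =>
    intro l acc h
    have hl : l = [] := by cases l <;> simp_all
    subst hl
    simp [PySem.Chars.count.go]
  | succ n ih =>
    intro l acc h
    cases l with
    | nil => simp [PySem.Chars.count.go]
    | cons c rest =>
      rw [PySem.Chars.count.go.eq_def]
      by_cases hc : c = '.'
      · subst hc
        have hpre : List.isPrefixOf ['.'] ('.' :: rest) = true := by
          simp [List.isPrefixOf]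
        simp only [hpre, if_pos]
        rw [show List.drop (['.'] : List Char).length ('.' :: rest) = rest from rfl]
        rw [ih rest (acc + 1) (by simpa using Nat.le_of_succ_le_succ h)]
        simp
        omega
      · have hpre : List.isPrefixOf ['.'] (c :: rest) = false := by
          simp [List.isPrefixOf, Ne.symm hc]
        simp only [hpre]
        rw [ih rest acc (by simpa using Nat.le_of_succ_le_succ h)]
        simp [hc]

theorem chars_count_eq (cs : List Char) : PySem.Chars.count cs ['.'] = cs.count '.' := by
  rw [PySem.Chars.count]
  rw [if_neg (by simp)]
  rw [count_go_eq cs.length cs 0 (le_refl _)]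
  omega

theorem length_sd (cs : List Char) : (sd cs).length = cs.count '.' + 1 := by
  induction cs with
  | nil => simp [sd]
  | cons c cs ih =>
    simp only [sd]
    by_cases hc : c = '.'
    · simp [hc, ih]
    · simp [hc, ih]

theorem prefix_dot_iff (cs : List Char) : (['.'] <+: cs) ↔ cs.head? = some '.' := by
  cases cs with
  | nil => simp
  | cons c t => simp [List.cons_prefix_cons, eq_comm]

theorem suffix_dot_iff (cs : List Char) : (['.'] <:+ cs) ↔ cs.getLast? = some '.' := by
  induction cs with
  | nil => simp
  | cons c t ih =>
    rw [List.suffix_cons_iff]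
    cases t with
    | nil => simp [eq_comm]
    | cons d t' => simp [List.getLast?_cons_cons, ← ih]

theorem headD_sd (cs : List Char) : (sd cs).headD [] = [] ↔ (cs.head? = some '.' ∨ cs = []) := by
  cases cs with
  | nil => simp [sd]
  | cons c t =>
    simp only [sd]
    by_cases hc : c = '.'
    · simp [hc]
    · obtain ⟨a, r, hsd⟩ := sd_cons_exists t
      simp [hc, hsd]

theorem tail_sd_iff (cs : List Char) :
    (∀ p ∈ (sd cs).tail, p ≠ []) ↔ (¬ ['.', '.'] <:+: cs ∧ cs.getLast? ≠ some '.') := by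
  induction cs with
  | nil => simp [sd]
  | cons c t ih =>
    by_cases hc : c = '.'
    · subst hc
      have hsdd : sd ('.' :: t) = [] :: sd t := by simp [sd]
      rw [hsdd, List.tail_cons]
      cases t with
      | nil =>
        constructor
        · intro h
          exact absurd rfl (h [] (by simp [sd]))
        · rintro ⟨-, h⟩
          exact absurd rfl h
      | cons d t' =>
        obtain ⟨a, r, hsd⟩ := sd_cons_exists (d :: t')
        have hmem : (∀ p ∈ sd (d :: t'), p ≠ []) ↔
            ((sd (d :: t')).headD [] ≠ [] ∧ ∀ p ∈ (sd (d :: t')).tail, p ≠ []) := by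
          rw [hsd]; simp
        rw [hmem, ih]
        simp only [ne_eq, headD_sd]
        have hinf : (['.', '.'] <:+: ('.' :: d :: t')) ↔
            ((d :: t').head? = some '.' ∨ ['.', '.'] <:+: (d :: t')) := by
          rw [List.infix_cons_iff]
          constructor
          · rintro (hp | hi)
            · left
              rw [List.cons_prefix_cons] at hp
              rw [← prefix_dot_iff]; exact hp.2
            · right; exact hi
          · rintro (hh | hi)
            · left
              rw [List.cons_prefix_cons]
              exact ⟨rfl, (prefix_dot_iff _).mpr hh⟩
            · right; exact hi
        rw [List.getLast?_cons_cons, hinf]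
        tauto
    · simp only [sd, if_neg hc]
      obtain ⟨a, r, hsd⟩ := sd_cons_exists t
      have htail : ((sd t).modifyHead (fun p => c :: p)).tail = (sd t).tail := by
        rw [hsd]; simp
      rw [htail]
      have hinf : (['.', '.'] <:+: (c :: t)) ↔ ['.', '.'] <:+: t := by
        rw [List.infix_cons_iff]
        constructor
        · rintro (hp | hi)
          · rw [List.cons_prefix_cons] at hp
            exact absurd hp.1.symm hc
          · exact hi
        · intro hi; right; exact hi
      rw [hinf]
      cases t with
      | nil =>
        simp [sd, hc]
      | cons d t' =>
        rw [List.getLast?_cons_cons]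
        exact ih

theorem all_sd_iff (cs : List Char) :
    (∀ p ∈ sd cs, p ≠ []) ↔
      (cs ≠ [] ∧ cs.head? ≠ some '.' ∧ ¬ ['.', '.'] <:+: cs ∧ cs.getLast? ≠ some '.') := by
  obtain ⟨a, t, hsd⟩ := sd_cons_exists cs
  have hmem : (∀ p ∈ sd cs, p ≠ []) ↔ ((sd cs).headD [] ≠ [] ∧ ∀ p ∈ (sd cs).tail, p ≠ []) := by
    rw [hsd]; simp
  rw [hmem]
  simp only [ne_eq, headD_sd, tail_sd_iff]
  tauto

-- ===== VERDICT (by name: the statement is the Claim_ definition above) =====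
theorem validate_token_structure_py_spec : Claim_equal_validate_token_structure_py := by
  intro token _
  unfold Spec_validate_token_structure_py validate_token_structure_py validate_token_structure_py_alt
  by_cases hnil : token.toList = []
  · simp [hnil]
  · rw [if_neg hnil, if_neg hnil, Bool.eq_iff_iff]
    have hdot : ("." : String).toList = ['.'] := rfl
    have hdd : (".." : String).toList = ['.', '.'] := rfl
    simp only [PySem.Str.count_eq, PySem.Str.isIn_eq, PySem.Str.startswith_eq,
      PySem.Str.endswith_eq, hdot, hdd, splitOn_eq, chars_count_eq]
    by_cases hlen : token.toList.count '.' = 2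
    · rw [if_neg (by rw [length_sd]; omega)]
      have hin : ((!PySem.Chars.isIn ['.', '.'] token.toList) = true) ↔
          ¬ ['.', '.'] <:+: token.toList := by
        cases h : PySem.Chars.isIn ['.', '.'] token.toList
        · simp [(PySem.Chars.isIn_eq_false_iff _ _).mp h]
        · simp [(PySem.Chars.isIn_iff_infix _ _).mp h]
      have hsw : ((!PySem.Chars.startswith token.toList ['.']) = true) ↔
          token.toList.head? ≠ some '.' := by
        cases h : PySem.Chars.startswith token.toList ['.']
        · have h2 : ¬ (['.'] <+: token.toList) := by
            rw [← PySem.Chars.startswith_iff _ _]; simp [h]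
          rw [prefix_dot_iff] at h2
          simp [h2]
        · have h2 : ['.'] <+: token.toList := (PySem.Chars.startswith_iff _ _).mp h
          rw [prefix_dot_iff] at h2
          simp [h2]
      have hew : ((!PySem.Chars.endswith token.toList ['.']) = true) ↔
          token.toList.getLast? ≠ some '.' := by
        cases h : PySem.Chars.endswith token.toList ['.']
        · have h2 : ¬ (['.'] <:+ token.toList) := by
            rw [← PySem.Chars.endswith_iff _ _]; simp [h]
          rw [suffix_dot_iff] at h2
          simp [h2]
        · have h2 : ['.'] <:+ token.toList := (PySem.Chars.endswith_iff _ _).mp h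
          rw [suffix_dot_iff] at h2
          simp [h2]
      have hne : ∀ (p : List Char), ((!p.isEmpty) = true) ↔ p ≠ [] := by
        intro p; cases p <;> simp
      simp only [List.all_eq_true, Bool.and_eq_true, beq_iff_eq, hne]
      rw [all_sd_iff, hin, hsw, hew]
      constructor
      · rintro ⟨-, h2, h3, h4⟩
        exact ⟨⟨⟨hlen, h3⟩, h2⟩, h4⟩
      · rintro ⟨⟨⟨-, h3⟩, h2⟩, h4⟩
        exact ⟨hnil, h2, h3, h4⟩
    · rw [if_pos (by rw [length_sd]; omega)]
      simp [Bool.and_eq_true, beq_iff_eq, hlen]
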